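-- pv_equiv track=rewrite | github.com/SBRG/pyphylon | pyphylon/plotting_util.py | find_once_genes
-- ===== SOURCE A (Python) =====
-- def find_once_genes(strain_vectors):
--     """
--     Finds genes that appear exactly once in each strain and returns the common and once-only genes.
--
--     Parameters:
--     strain_vectors (dict): A dictionary where keys are strain identifiers and values are lists of genes.
--
--     Returns:
--     tuple: The number of common genes, the number of genes appearing exactly once in each strain, and a set of those genes.
--     """
--     # Finding intersection of all strains
--     common_genes = set(strain_vectors[next(iter(strain_vectors))])  # Start with the first strain's genes
--     for genes in strain_vectors.values():
--         common_genes.intersection_update(genes)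
--
--     # Check for genes that appear exactly once in each strain
--     once_genes = set()
--     all_strains_genes = list(strain_vectors.values())
--     first_strain_genes = all_strains_genes[0]
--
--     # Only add genes to the consistent set if they appear exactly once in every strain
--     for gene in common_genes:
--         if all(genes.count(gene) == 1 for genes in all_strains_genes):
--             once_genes.add(gene)
--
--     return len(common_genes), len(once_genes), once_genes
-- ===== SOURCE B (Python) =====
-- def find_once_genes(strain_vectors):
--     """
--     Same task as A, by a different route: one pass per strain builds a tally
--     (occurrence counts); the gene sets and the once-only sets of all strains
--     are then intersected, instead of rescanning every strain per common gene.
--     """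
--     common = None
--     once = None
--     for genes in strain_vectors.values():
--         tally = {}
--         for g in genes:
--             tally[g] = tally.get(g, 0) + 1
--         gene_set = set(tally)
--         once_set = {g for g, c in tally.items() if c == 1}
--         if common is None:
--             common, once = gene_set, once_set
--         else:
--             common &= gene_set
--             once &= once_set
--     return len(common), len(once), once
-- ===== Notes on version B (the rewrite author's own statement) =====
-- stated objective: alternative
-- what changed: A intersects the strains' gene lists and then, for every common gene, rescans every strain with list.count; B makes a single tally pass per strain, derives each strain's gene set and exactly-once set from the tally, and intersects those per-strain sets, so no gene-by-gene rescan remains.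
import Mathlib
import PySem

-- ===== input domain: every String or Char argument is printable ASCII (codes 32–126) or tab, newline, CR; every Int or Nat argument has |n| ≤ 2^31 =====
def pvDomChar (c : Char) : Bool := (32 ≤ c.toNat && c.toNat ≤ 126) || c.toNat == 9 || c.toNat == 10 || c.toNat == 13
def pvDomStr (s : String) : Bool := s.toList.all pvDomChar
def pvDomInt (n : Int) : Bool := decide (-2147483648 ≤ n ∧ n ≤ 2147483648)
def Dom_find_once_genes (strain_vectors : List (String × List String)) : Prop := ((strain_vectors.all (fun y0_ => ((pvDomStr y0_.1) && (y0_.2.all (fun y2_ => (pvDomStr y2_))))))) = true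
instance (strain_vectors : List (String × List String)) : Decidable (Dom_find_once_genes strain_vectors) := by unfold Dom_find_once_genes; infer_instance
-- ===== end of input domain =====

-- B replaces A's per-common-gene rescan of every strain with one tally pass per
-- strain followed by intersections of per-strain gene sets and exactly-once sets
-- (same results; objective: alternative algorithm).


-- ===== PORT A =====
def find_once_genes (strain_vectors : List (String × List String)) : Int × Int × List String :=
  let d := PySem.Dict.ofList strain_vectors
  match d.values with
  | [] => (0, 0, [])  -- next(iter({})) raises StopIteration: excluded by Pre_
  | first_key_genes :: _ =>
    -- common_genes = set(strain_vectors[next(iter(strain_vectors))]); then intersection_update over values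
    let common_genes :=
      d.values.foldl (fun cg genes => PySem.Set.inter cg genes) (PySem.Set.ofList first_key_genes)
    let all_strains_genes := d.values
    -- for gene in common_genes: if all(genes.count(gene) == 1 …): once_genes.add(gene)
    let once_genes :=
      common_genes.foldl (fun og gene =>
        if all_strains_genes.all (fun genes => PySem.List.count genes gene == 1)
        then PySem.Set.add og gene else og) PySem.Set.empty
    ((PySem.Set.len common_genes : Int), (PySem.Set.len once_genes : Int), once_genes)

-- ===== PORT B =====
-- once_set = {g for g, c in tally.items() if c == 1}
def pvOnceOfTally (tally : PySem.Dict String Int) : PySem.Set String :=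
  (tally.items.filter (fun p => p.2 == 1)).map Prod.fst

-- the body of B's 'for genes in strain_vectors.values()' loop (state: none before the first strain)
def pvStepB (st : Option (PySem.Set String × PySem.Set String)) (genes : List String) :
    Option (PySem.Set String × PySem.Set String) :=
  let tally := genes.foldl (fun t g => t.modify g 0 (· + 1)) PySem.Dict.empty
  let gene_set := tally.keys
  let once_set := pvOnceOfTally tally
  match st with
  | none => some (gene_set, once_set)
  | some (c, o) => some (PySem.Set.inter c gene_set, PySem.Set.inter o once_set)

def find_once_genes_alt (strain_vectors : List (String × List String)) : Int × Int × List String :=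
  match ((PySem.Dict.ofList strain_vectors).values).foldl pvStepB none with
  | none => (0, 0, [])  -- len(None) raises TypeError: excluded by Pre_
  | some (c, o) => ((PySem.Set.len c : Int), (PySem.Set.len o : Int), o)

-- ===== PRECONDITION & SPEC =====
-- On the empty dict A raises StopIteration (and B raises TypeError): excluded.
def Pre_find_once_genes (strain_vectors : List (String × List String)) : Prop :=
  strain_vectors ≠ []
instance (strain_vectors : List (String × List String)) : Decidable (Pre_find_once_genes strain_vectors) := by
  unfold Pre_find_once_genes; infer_instance

def pvWitness_find_once_genes : (List (String × List String)) :=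
  [("s1", ["a", "b", "a"]), ("s2", ["b", "a"])]

def Spec_find_once_genes (strain_vectors : List (String × List String)) (out : Int × Int × List String) : Prop := out = find_once_genes_alt strain_vectors
instance (strain_vectors : List (String × List String)) (out : Int × Int × List String) : Decidable (Spec_find_once_genes strain_vectors out) := by unfold Spec_find_once_genes; infer_instance

-- ===== CLAIM (what is proved, stated in full; the proofs are below) =====
def Claim_equal_find_once_genes : Prop := ∀ (strain_vectors : List (String × List String)), Dom_find_once_genes strain_vectors → Pre_find_once_genes strain_vectors → Spec_find_once_genes strain_vectors (find_once_genes strain_vectors)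

-- ===== LEMMAS AND PROOFS =====

-- membership forms used throughout
theorem contains_ofList_eq (l : List String) (a : String) :
    (PySem.Set.ofList l).contains a = l.contains a := by
  simp [PySem.Set.contains_eq_listContains]

-- a fold of set intersections is one filter by membership in every operand
theorem foldl_inter_eq_filter (l : List (List String)) (s : PySem.Set String) :
    l.foldl (fun cg genes => PySem.Set.inter cg genes) s
      = s.filter (fun g => l.all (fun xs => xs.contains g)) := by
  induction l generalizing s with
  | nil => simp
  | cons x xs ih =>
    rw [List.foldl_cons, ih]
    have hx : PySem.Set.inter s x = s.filter (fun g => x.contains g) := rfl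
    rw [hx, List.filter_filter]
    apply List.filter_congr
    intro g _
    simp [List.all_cons, Bool.and_comm]

-- A's 'add if every count is 1' loop over a duplicate-free list is a filter
theorem foldl_add_if_eq_filter (p : String → Bool) (l : List String) (s : PySem.Set String)
    (hnd : l.Nodup) (hdisj : ∀ x ∈ l, x ∉ s) :
    l.foldl (fun og gene => if p gene then PySem.Set.add og gene else og) s
      = s ++ l.filter p := by
  induction l generalizing s with
  | nil => simp
  | cons x xs ih =>
    rcases List.nodup_cons.mp hnd with ⟨hx, hxs⟩
    rw [List.foldl_cons, List.filter_cons]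
    by_cases hp : p x = true
    · rw [if_pos hp, if_pos hp, PySem.Set.add_of_not_mem (hdisj x (List.mem_cons_self))]
      have hdisj' : ∀ y ∈ xs, y ∉ s ++ [x] := by
        intro y hy hmem
        rcases List.mem_append.mp hmem with h | h
        · exact hdisj y (List.mem_cons_of_mem _ hy) h
        · exact hx ((List.mem_singleton.mp h) ▸ hy)
      rw [ih _ hxs hdisj']
      simp
    · rw [if_neg hp, if_neg hp]
      exact ih _ hxs (fun y hy => hdisj y (List.mem_cons_of_mem _ hy))

-- B's loop over the remaining strains intersects both components with each
-- strain's gene set and once set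
theorem foldl_stepB_some (l : List (List String)) (c o : PySem.Set String) :
    l.foldl pvStepB (some (c, o))
      = some (c.filter (fun g => l.all (fun xs => (PySem.Set.ofList xs).contains g)),
              o.filter (fun g => l.all (fun xs =>
                (pvOnceOfTally (PySem.Dict.counter xs)).contains g))) := by
  induction l generalizing c o with
  | nil => simp
  | cons x xs ih =>
    rw [List.foldl_cons]
    have hx : pvStepB (some (c, o)) x
        = some (PySem.Set.inter c (PySem.Dict.counter x).keys,
                PySem.Set.inter o (pvOnceOfTally (PySem.Dict.counter x))) := rfl
    rw [hx, PySem.Dict.keys_counter, ih]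
    have hi1 : PySem.Set.inter c (PySem.Set.ofList x)
        = c.filter (fun g => (PySem.Set.ofList x).contains g) := rfl
    have hi2 : PySem.Set.inter o (pvOnceOfTally (PySem.Dict.counter x))
        = o.filter (fun g => (pvOnceOfTally (PySem.Dict.counter x)).contains g) := rfl
    rw [hi1, hi2, List.filter_filter, List.filter_filter]
    congr 1
    apply Prod.ext <;>
      · apply List.filter_congr
        intro g _
        simp [List.all_cons, Bool.and_comm]

-- the exactly-once set of a strain's tally, as a filter of its gene set
theorem pvOnceOfTally_counter (xs : List String) :
    pvOnceOfTally (PySem.Dict.counter xs)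
      = (PySem.Set.ofList xs).filter (fun g => List.count g xs == 1) := by
  unfold pvOnceOfTally
  rw [PySem.Dict.items_counter, List.filter_map, List.map_map]
  have h1 : ((fun (p : String × Int) => p.2 == 1) ∘ fun k => (k, (List.count k xs : Int)))
      = fun g => List.count g xs == 1 := by
    funext g; simp
  rw [h1]
  simp [Function.comp_def]

theorem mem_pvOnce_iff (xs : List String) (g : String) :
    g ∈ pvOnceOfTally (PySem.Dict.counter xs) ↔ List.count g xs = 1 := by
  rw [pvOnceOfTally_counter]
  simp only [List.mem_filter, PySem.Set.mem_ofList, beq_iff_eq]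
  exact ⟨fun h => h.2, fun h => ⟨List.count_pos_iff.mp (by omega), h⟩⟩

-- ===== VERDICT (by name: the statement is the Claim_ definition above) =====
theorem find_once_genes_spec : Claim_equal_find_once_genes := by
  intro sv _ _
  unfold Spec_find_once_genes find_once_genes find_once_genes_alt
  cases hv : (PySem.Dict.ofList sv).values with
  | nil => simp only [hv]; rfl
  | cons first rest =>
    simp only [hv, List.foldl_cons]
    have hstep : pvStepB none first
        = some ((PySem.Dict.counter first).keys, pvOnceOfTally (PySem.Dict.counter first)) := rfl
    rw [hstep, PySem.Dict.keys_counter, foldl_stepB_some, foldl_inter_eq_filter]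
    have hi0 : PySem.Set.inter (PySem.Set.ofList first) first
        = (PySem.Set.ofList first).filter (fun g => first.contains g) := rfl
    rw [hi0, List.filter_filter]
    -- the two common sets are the same filter of the first strain's gene set
    have hcommon :
        (PySem.Set.ofList first).filter
            (fun g => rest.all (fun xs => xs.contains g) && first.contains g)
          = (PySem.Set.ofList first).filter
            (fun g => rest.all (fun xs => (PySem.Set.ofList xs).contains g)) := by
      apply List.filter_congr
      intro g hg
      have hgf : g ∈ first := (PySem.Set.mem_ofList _ _).mp hg
      simp only [contains_ofList_eq]
      simp [hgf]
    rw [hcommon]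
    -- A's once loop is a filter of the common set; merged, it is the
    -- 'every count is 1' filter of the first strain's gene set
    set pA : String → Bool :=
      fun gene => (first :: rest).all (fun genes => PySem.List.count genes gene == 1) with hpA
    have hAnodup : ((PySem.Set.ofList first).filter
        (fun g => rest.all (fun xs => (PySem.Set.ofList xs).contains g))).Nodup :=
      (PySem.Set.nodup_ofList first).filter _
    have honceA :
        ((PySem.Set.ofList first).filter
            (fun g => rest.all (fun xs => (PySem.Set.ofList xs).contains g))).foldl
          (fun og gene => if pA gene then PySem.Set.add og gene else og) PySem.Set.empty
        = (PySem.Set.ofList first).filter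
            (fun g => (first :: rest).all (fun genes => List.count g genes == 1)) := by
      rw [foldl_add_if_eq_filter pA _ _ hAnodup (by intro x _ hc; simp [PySem.Set.empty] at hc)]
      simp only [PySem.Set.empty, List.nil_append, List.filter_filter]
      apply List.filter_congr
      intro g hg
      have hgf : g ∈ first := (PySem.Set.mem_ofList _ _).mp hg
      by_cases hp : (first :: rest).all (fun genes => List.count g genes == 1) = true
      · have hmem : rest.all (fun xs => (PySem.Set.ofList xs).contains g) = true := by
          simp only [List.all_cons, Bool.and_eq_true] at hp
          simp only [List.all_eq_true] at hp ⊢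
          intro xs hxs
          have h1 := hp.2 xs hxs
          simp only [beq_iff_eq] at h1
          have : g ∈ xs := (List.count_pos_iff).mp (by omega)
          simp [this]
        simp only [hpA, PySem.List.count]
        simp_all
      · simp only [hpA, PySem.List.count]
        simp_all
    rw [honceA]
    -- B's once set is the same filter
    have honceB :
        (pvOnceOfTally (PySem.Dict.counter first)).filter
            (fun g => rest.all (fun xs =>
              (pvOnceOfTally (PySem.Dict.counter xs)).contains g))
          = (PySem.Set.ofList first).filter
            (fun g => (first :: rest).all (fun genes => List.count g genes == 1)) := by
      rw [pvOnceOfTally_counter, List.filter_filter]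
      apply List.filter_congr
      intro g _
      simp [List.all_cons, mem_pvOnce_iff, Bool.and_comm, Bool.beq_eq_decide_eq]
    rw [honceB]
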